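-- pv_equiv track=rewrite | github.com/kejsitake/binary_authorship_attribution | DepthASTNode.py | frequencyCountAndPositions
-- ===== SOURCE A (Python) =====
-- def frequencyCountAndPositions(mainStr, subStr):
--     counter = pos = 0
--     indexpos = []
--     substrs = [")"+subStr +"(","("+subStr +"(","("+subStr +")",")"+subStr +")"]
--     for subStr in substrs:
--         index=0
--         text = subStr
--         while index < len(mainStr):
--             index = mainStr.find(text, index)
--             if index == -1:
--                 break
--             else:
--                 indexpos.append(index)
--             index += len(text)
--     return indexpos
-- ===== SOURCE B (Python) =====
-- def frequencyCountAndPositions(mainStr, subStr):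
--     L = len(subStr)
--     keys = [(')', '('), ('(', '('), ('(', ')'), (')', ')')]
--     buckets = {k: [] for k in keys}
--     nxt = {k: 0 for k in keys}
--     for i in range(len(mainStr) - L - 1):
--         o = mainStr[i]
--         c = mainStr[i + L + 1]
--         if o in '()' and c in '()' and mainStr[i + 1:i + L + 1] == subStr:
--             k = (o, c)
--             if i >= nxt[k]:
--                 buckets[k].append(i)
--                 nxt[k] = i + L + 2
--     return buckets[(')', '(')] + buckets[('(', '(')] + buckets[('(', ')')] + buckets[(')', ')')]
-- ===== Notes on version B (the rewrite author's own statement) =====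
-- stated objective: alternative
-- what changed: Replaces four sequential str.find skip-loops (one per wrapped variant) by a single left-to-right scan that classifies each bracket-wrapped occurrence of subStr into one of four buckets keyed by its surrounding bracket pair, with a per-bucket next-allowed index enforcing non-overlap, then concatenates the buckets in the original variant order.
import Mathlib
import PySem

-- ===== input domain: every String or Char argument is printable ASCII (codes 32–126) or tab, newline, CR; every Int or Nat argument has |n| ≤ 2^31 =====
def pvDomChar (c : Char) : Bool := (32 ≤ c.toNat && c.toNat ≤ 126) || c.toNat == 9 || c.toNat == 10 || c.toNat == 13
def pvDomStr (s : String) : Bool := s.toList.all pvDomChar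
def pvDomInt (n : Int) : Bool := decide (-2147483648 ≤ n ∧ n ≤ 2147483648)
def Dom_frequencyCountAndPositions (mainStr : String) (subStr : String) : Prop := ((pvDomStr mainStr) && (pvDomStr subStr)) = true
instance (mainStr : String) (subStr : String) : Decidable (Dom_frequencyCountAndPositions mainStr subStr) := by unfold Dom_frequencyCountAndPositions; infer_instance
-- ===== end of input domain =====

-- B replaces A's four sequential str.find skip-loops by one left-to-right scan into four
-- buckets (keyed by the surrounding bracket pair, each with its own next-allowed index);
-- objective: alternative single-pass decomposition, same exact result.


-- ===== PORT A =====
-- A's inner 'while index < len(mainStr): index = mainStr.find(text, index); …; index += len(text)'.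
-- 'ht' (each of A's four patterns is bracket-wrapped, hence nonempty) only justifies termination.
def pvFindLoopA (m text : List Char) (ht : 0 < text.length) (index : Nat) : List Int :=
  if h : index < m.length then
    let j := PySem.Chars.findFrom m text (index : Int)
    if hj : j = -1 then []
    else j :: pvFindLoopA m text ht (j.toNat + text.length)
  else []
termination_by m.length - index
decreasing_by
  have hspec := PySem.Chars.findFrom_natCast_spec m text index (Nat.le_of_lt h) hj
  omega

-- A's 'for subStr in substrs' over the four literal patterns is unrolled (same order,
-- indexpos accumulated left to right exactly as in the Python).
def frequencyCountAndPositions (mainStr : String) (subStr : String) : List Int :=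
  let m := mainStr.toList
  let sub := subStr.toList
  ((([] ++ pvFindLoopA m (')' :: (sub ++ ['('])) (by simp) 0)
        ++ pvFindLoopA m ('(' :: (sub ++ ['('])) (by simp) 0)
        ++ pvFindLoopA m ('(' :: (sub ++ [')'])) (by simp) 0)
        ++ pvFindLoopA m (')' :: (sub ++ [')'])) (by simp) 0

-- ===== PORT B =====
-- One bucket of Source B's scan: state (bucket, next-allowed index); the loop body's
-- 'k = (o, c); if i >= nxt[k]: …' is the '(o, c) = k' conjunct selecting this bucket.
def pvBStep (m sub : List Char) (k : Char × Char) (st : List Int × Nat) (i : Nat) : List Int × Nat :=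
  let o := PySem.List.pyGetD m (i : Int) ' '
  let c := PySem.List.pyGetD m ((i : Int) + sub.length + 1) ' '
  if (o = '(' ∨ o = ')') ∧ (c = '(' ∨ c = ')') ∧
      PySem.List.slice m (some ((i : Int) + 1)) (some ((i : Int) + 1 + sub.length)) = sub ∧
      (o, c) = k then
    if st.2 ≤ i then (st.1 ++ [(i : Int)], i + sub.length + 2) else st
  else st

-- Source B: 'for i in range(len(mainStr) - L - 1)' (Nat subtraction clamps exactly like
-- Python's empty range on a negative bound), four (bucket, nxt) pairs as the dict state.
def frequencyCountAndPositions_alt (mainStr : String) (subStr : String) : List Int :=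
  let m := mainStr.toList
  let sub := subStr.toList
  let r := (List.range (m.length - (sub.length + 1))).foldl
    (fun st i => (pvBStep m sub (')', '(') st.1 i, pvBStep m sub ('(', '(') st.2.1 i,
                  pvBStep m sub ('(', ')') st.2.2.1 i, pvBStep m sub (')', ')') st.2.2.2 i))
    (([], 0), ([], 0), ([], 0), ([], 0))
  r.1.1 ++ r.2.1.1 ++ r.2.2.1.1 ++ r.2.2.2.1

-- ===== PRECONDITION & SPEC =====
def Spec_frequencyCountAndPositions (mainStr : String) (subStr : String) (out : List Int) : Prop := out = frequencyCountAndPositions_alt mainStr subStr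
instance (mainStr : String) (subStr : String) (out : List Int) : Decidable (Spec_frequencyCountAndPositions mainStr subStr out) := by unfold Spec_frequencyCountAndPositions; infer_instance

-- ===== CLAIM (what is proved, stated in full; the proofs are below) =====
def Claim_equal_frequencyCountAndPositions : Prop := ∀ (mainStr : String) (subStr : String), Dom_frequencyCountAndPositions mainStr subStr → Spec_frequencyCountAndPositions mainStr subStr (frequencyCountAndPositions mainStr subStr)

-- ===== LEMMAS AND PROOFS =====

-- The common specification: greedy leftmost non-overlapping match positions of p in m from i.
def pvGreedy (m p : List Char) (hp : 0 < p.length) (i : Nat) : List Int :=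
  if h : i < m.length then
    if p <+: m.drop i then (i : Int) :: pvGreedy m p hp (i + p.length)
    else pvGreedy m p hp (i + 1)
  else []
termination_by m.length - i
decreasing_by all_goals omega

theorem pvGreedy_nil_of_not_infix (m p : List Char) (hp : 0 < p.length) (i : Nat)
    (hni : ¬ p <:+: m.drop i) : pvGreedy m p hp i = [] := by
  rw [pvGreedy]
  by_cases h : i < m.length
  · rw [dif_pos h, if_neg (fun hpref => hni hpref.isInfix)]
    refine pvGreedy_nil_of_not_infix m p hp (i + 1) (fun hinf => hni ?_)
    have hsuf : m.drop (i + 1) <:+ m.drop i := by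
      simpa [List.drop_drop, Nat.add_comm] using List.drop_suffix 1 (m.drop i)
    exact hinf.trans hsuf.isInfix
  · rw [dif_neg h]
termination_by m.length - i
decreasing_by omega

theorem pvGreedy_nil_of_ge (m p : List Char) (hp : 0 < p.length) (i : Nat)
    (hlen : m.length < i + p.length) : pvGreedy m p hp i = [] := by
  rw [pvGreedy]
  by_cases h : i < m.length
  · have hnp : ¬ p <+: m.drop i := by
      intro hpref
      have := hpref.length_le
      simp [List.length_drop] at this
      omega
    rw [dif_pos h, if_neg hnp]
    exact pvGreedy_nil_of_ge m p hp (i + 1) (by omega)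
  · rw [dif_neg h]
termination_by m.length - i
decreasing_by omega

theorem pvGreedy_of_first_match (m p : List Char) (hp : 0 < p.length) (jn : Nat)
    (hj : p <+: m.drop jn) (i : Nat) (hle : i ≤ jn)
    (hmin : ∀ t, i ≤ t → t < jn → ¬ p <+: m.drop t) :
    pvGreedy m p hp i = (jn : Int) :: pvGreedy m p hp (jn + p.length) := by
  have hjlt : jn < m.length := by
    have := hj.length_le
    simp [List.length_drop] at this
    omega
  rcases Nat.eq_or_lt_of_le hle with heq | hlt
  · subst heq
    rw [pvGreedy, dif_pos hjlt, if_pos hj]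
  · rw [pvGreedy, dif_pos (by omega), if_neg (hmin i le_rfl hlt)]
    exact pvGreedy_of_first_match m p hp jn hj (i + 1) (by omega)
      (fun t ht1 ht2 => hmin t (by omega) ht2)
termination_by jn - i
decreasing_by omega

theorem pvFindLoopA_eq_pvGreedy (m p : List Char) (hp : 0 < p.length) (i : Nat) :
    pvFindLoopA m p hp i = pvGreedy m p hp i := by
  rw [pvFindLoopA]
  by_cases h : i < m.length
  · rw [dif_pos h]
    dsimp only
    by_cases hj : PySem.Chars.findFrom m p (i : Int) = -1
    · rw [dif_pos hj]
      exact (pvGreedy_nil_of_not_infix m p hp i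
        ((PySem.Chars.findFrom_natCast_eq_neg_one_iff m p i h.le).mp hj)).symm
    · rw [dif_neg hj]
      obtain ⟨hge, hpre, hmin⟩ := PySem.Chars.findFrom_natCast_spec m p i h.le hj
      have hj0 : 0 ≤ PySem.Chars.findFrom m p (i : Int) :=
        le_trans (by exact_mod_cast Int.natCast_nonneg i) hge
      have hjn : ((PySem.Chars.findFrom m p (i : Int)).toNat : Int)
          = PySem.Chars.findFrom m p (i : Int) := Int.toNat_of_nonneg hj0
      have hile : i ≤ (PySem.Chars.findFrom m p (i : Int)).toNat := by omega
      rw [pvGreedy_of_first_match m p hp _ hpre i hile hmin]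
      exact congrArg₂ List.cons hjn.symm
        (pvFindLoopA_eq_pvGreedy m p hp ((PySem.Chars.findFrom m p (i : Int)).toNat + p.length))
  · rw [dif_neg h, pvGreedy, dif_neg h]
termination_by m.length - i
decreasing_by omega

-- 'a ⧺ sub ⧺ b matches at i' in terms of the three pieces B's scan inspects
theorem pvPrefix_wrap_iff (m sub : List Char) (a b : Char) (i : Nat)
    (h : i + sub.length + 2 ≤ m.length) :
    (a :: (sub ++ [b])) <+: m.drop i ↔
      (m.getD i ' ' = a ∧ (m.drop (i + 1)).take sub.length = sub ∧
       m.getD (i + sub.length + 1) ' ' = b) := by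
  have hi : i < m.length := by omega
  have hc : i + sub.length + 1 < m.length := by omega
  rw [List.getD_eq_getElem _ _ hi, List.getD_eq_getElem _ _ hc,
      List.drop_eq_getElem_cons hi, List.cons_prefix_cons]
  refine and_congr ⟨fun h' => h'.symm, fun h' => h'.symm⟩ ?_
  rw [List.prefix_iff_eq_take, show (sub ++ [b]).length = sub.length + 1 by simp,
      List.take_add_one, List.getElem?_drop,
      show i + 1 + sub.length = i + sub.length + 1 from by omega,
      List.getElem?_eq_getElem hc]
  dsimp only [Option.toList]
  constructor
  · intro he
    have hlen2 : sub.length = ((m.drop (i + 1)).take sub.length).length := by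
      simp [List.length_take, List.length_drop]
      omega
    obtain ⟨h1, h2⟩ := List.append_inj he hlen2
    exact ⟨h1.symm, by simpa using h2.symm⟩
  · rintro ⟨h1, h2⟩
    rw [h1, h2]

-- the guard of pvBStep is exactly "the wrapped pattern matches at i" (for i inside the scan range)
theorem pvBStep_eq (m sub : List Char) (k : Char × Char)
    (hk1 : k.1 = '(' ∨ k.1 = ')') (hk2 : k.2 = '(' ∨ k.2 = ')')
    (i : Nat) (hi : i < m.length - (sub.length + 1)) (st : List Int × Nat) :
    pvBStep m sub k st i =
      if (k.1 :: (sub ++ [k.2])) <+: m.drop i then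
        (if st.2 ≤ i then (st.1 ++ [(i : Int)], i + sub.length + 2) else st)
      else st := by
  obtain ⟨ka, kb⟩ := k
  simp only at hk1 hk2
  have h2 : i + sub.length + 2 ≤ m.length := by omega
  unfold pvBStep
  dsimp only
  rw [show (i : Int) + sub.length + 1 = ((i + sub.length + 1 : Nat) : Int) from by push_cast; ring,
      show (i : Int) + 1 + sub.length = ((i + 1 : Nat) : Int) + (sub.length : Int) from by push_cast; ring,
      show (i : Int) + 1 = ((i + 1 : Nat) : Int) from by push_cast; ring,
      PySem.List.slice_natCast_add m (i + 1) sub.length]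
  simp only [PySem.List.pyGetD_natCast]
  refine if_congr ?_ rfl rfl
  rw [pvPrefix_wrap_iff m sub ka kb i h2]
  constructor
  · rintro ⟨ho, hc', hs, hk⟩
    obtain ⟨hka, hkb⟩ := Prod.mk.injEq .. ▸ hk
    exact ⟨by rw [← hka], hs, by rw [← hkb]⟩
  · rintro ⟨h1, hs, h3⟩
    exact ⟨by rw [h1]; exact hk1, by rw [h3]; exact hk2, hs, by rw [h1, h3]⟩

theorem pvBucket_inv (m sub : List Char) (k : Char × Char)
    (hk1 : k.1 = '(' ∨ k.1 = ')') (hk2 : k.2 = '(' ∨ k.2 = ')') :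
    ∀ d j acc nxt, m.length - (sub.length + 1) - j ≤ d → j ≤ m.length - (sub.length + 1) →
    ((List.range' j (m.length - (sub.length + 1) - j)).foldl (pvBStep m sub k) (acc, nxt)).1
      = acc ++ pvGreedy m (k.1 :: (sub ++ [k.2])) (by simp) (max j nxt) := by
  intro d
  induction d with
  | zero =>
    intro j acc nxt h1 h2
    rw [show m.length - (sub.length + 1) - j = 0 from by omega, List.range'_zero, List.foldl_nil]
    rw [pvGreedy_nil_of_ge m _ _ (max j nxt)
      (by simp only [List.length_cons, List.length_append]
          have := Nat.le_max_left j nxt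
          omega),
      List.append_nil]
  | succ d IH =>
    intro j acc nxt h1 h2
    rcases Nat.eq_or_lt_of_le h2 with he | hlt
    · rw [show m.length - (sub.length + 1) - j = 0 from by omega, List.range'_zero, List.foldl_nil]
      rw [pvGreedy_nil_of_ge m _ _ (max j nxt)
        (by simp only [List.length_cons, List.length_append]
            have := Nat.le_max_left j nxt
            omega),
        List.append_nil]
    · have hjm : j < m.length := by omega
      rw [show m.length - (sub.length + 1) - j = (m.length - (sub.length + 1) - (j + 1)) + 1 from by omega,
          List.range'_succ, List.foldl_cons, pvBStep_eq m sub k hk1 hk2 j hlt (acc, nxt)]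
      dsimp only
      by_cases hm : (k.1 :: (sub ++ [k.2])) <+: m.drop j
      · rw [if_pos hm]
        by_cases hn : nxt ≤ j
        · rw [if_pos hn, IH (j + 1) (acc ++ [(j : Int)]) (j + sub.length + 2) (by omega) (by omega),
              Nat.max_eq_left hn,
              Nat.max_eq_right (by omega : j + 1 ≤ j + sub.length + 2)]
          conv_rhs => rw [pvGreedy]
          rw [dif_pos hjm, if_pos hm,
              show j + (k.1 :: (sub ++ [k.2])).length = j + sub.length + 2 from by simp; omega]
          simp
        · rw [if_neg hn, IH (j + 1) acc nxt (by omega) (by omega),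
              Nat.max_eq_right (by omega : j + 1 ≤ nxt), Nat.max_eq_right (by omega : j ≤ nxt)]
      · rw [if_neg hm, IH (j + 1) acc nxt (by omega) (by omega)]
        by_cases hn : nxt ≤ j
        · rw [Nat.max_eq_left (by omega : nxt ≤ j + 1), Nat.max_eq_left hn]
          conv_rhs => rw [pvGreedy]
          rw [dif_pos hjm, if_neg hm]
        · rw [Nat.max_eq_right (by omega : j + 1 ≤ nxt), Nat.max_eq_right (by omega : j ≤ nxt)]

theorem pvBucket_eq (m sub : List Char) (k : Char × Char)
    (hk1 : k.1 = '(' ∨ k.1 = ')') (hk2 : k.2 = '(' ∨ k.2 = ')') :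
    ((List.range (m.length - (sub.length + 1))).foldl (pvBStep m sub k) ([], 0)).1
      = pvGreedy m (k.1 :: (sub ++ [k.2])) (by simp) 0 := by
  rw [List.range_eq_range']
  have h := pvBucket_inv m sub k hk1 hk2 (m.length - (sub.length + 1)) 0 [] 0
    (by omega) (by omega)
  simpa using h

-- splitting Source B's four-bucket state into four independent folds
theorem pvFold4 (m sub : List Char) (k1 k2 k3 k4 : Char × Char) (l : List Nat)
    (s1 s2 s3 s4 : List Int × Nat) :
    l.foldl (fun st i => (pvBStep m sub k1 st.1 i, pvBStep m sub k2 st.2.1 i,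
        pvBStep m sub k3 st.2.2.1 i, pvBStep m sub k4 st.2.2.2 i)) (s1, s2, s3, s4)
      = (l.foldl (pvBStep m sub k1) s1, l.foldl (pvBStep m sub k2) s2,
         l.foldl (pvBStep m sub k3) s3, l.foldl (pvBStep m sub k4) s4) := by
  rw [PySem.List.foldl_prod_mk (pvBStep m sub k1)
        (fun s i => (pvBStep m sub k2 s.1 i, pvBStep m sub k3 s.2.1 i, pvBStep m sub k4 s.2.2 i)),
      PySem.List.foldl_prod_mk (pvBStep m sub k2)
        (fun s i => (pvBStep m sub k3 s.1 i, pvBStep m sub k4 s.2 i)),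
      PySem.List.foldl_prod_mk (pvBStep m sub k3) (pvBStep m sub k4)]

-- ===== VERDICT (by name: the statement is the Claim_ definition above) =====
theorem frequencyCountAndPositions_spec : Claim_equal_frequencyCountAndPositions := by
  intro mainStr subStr _
  unfold Spec_frequencyCountAndPositions frequencyCountAndPositions frequencyCountAndPositions_alt
  dsimp only
  rw [pvFold4]
  simp only [pvFindLoopA_eq_pvGreedy]
  rw [pvBucket_eq _ _ _ (Or.inr rfl) (Or.inl rfl), pvBucket_eq _ _ _ (Or.inl rfl) (Or.inl rfl),
      pvBucket_eq _ _ _ (Or.inl rfl) (Or.inr rfl), pvBucket_eq _ _ _ (Or.inr rfl) (Or.inr rfl)]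
  simp
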